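-- pv_equiv track=rewrite | github.com/broomsday/volumizer | volumizer/rcsb.py | parse_cluster_representative_member_entry_ids
-- ===== SOURCE A (Python) =====
-- def is_pdb_entry_id(entry_id: str) -> bool:
--     """
--     Return True for 4-character alphanumeric PDB entry identifiers.
--     """
--     return len(entry_id) == 4 and entry_id.isalnum()
--
-- def _cluster_entity_to_entry_id(entity_id: str) -> str | None:
--     entry_id = str(entity_id).strip().split("_", 1)[0].upper()
--     if not is_pdb_entry_id(entry_id):
--         return None
--     return entry_id
--
-- def parse_cluster_representative_member_entry_ids(
--     cluster_text: str,
-- ) -> dict[str, list[str]]: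
--     """
--     Parse sequence cluster text into representative-to-member entry ID mappings.
--
--     Cluster lines contain polymer entity IDs, e.g. `1ABC_1 2XYZ_2 ...`.
--     The first valid PDB entry token on each line is treated as the representative.
--     All valid 4-character PDB entry IDs on the line are retained as members.
--     """
--     representative_to_members: dict[str, list[str]] = {}
--
--     for raw_line in cluster_text.splitlines():
--         line = raw_line.strip()
--         if len(line) == 0:
--             continue
--
--         members: list[str] = []
--         seen_members: set[str] = set()
--         for token in line.split():
--             entry_id = _cluster_entity_to_entry_id(token)
--             if entry_id is None or entry_id in seen_members:
--                 continue
--             members.append(entry_id)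
--             seen_members.add(entry_id)
--
--         if len(members) == 0:
--             continue
--
--         representative_id = members[0]
--         existing_members = representative_to_members.get(representative_id)
--         if existing_members is None:
--             representative_to_members[representative_id] = members
--             continue
--
--         existing_seen = set(existing_members)
--         for member_id in members:
--             if member_id in existing_seen:
--                 continue
--             existing_members.append(member_id)
--             existing_seen.add(member_id)
--
--     return representative_to_members
-- ===== SOURCE B (Python) =====
-- def parse_cluster_representative_member_entry_ids(cluster_text: str) -> dict[str, list[str]]:
--     """
--     Flatten-then-group: phase 1 turns the text into a flat stream of
--     (representative, member) pairs -- the representative is the first valid id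
--     on the line, and every valid id on the line emits one pair.  Phase 2 groups
--     the pair stream into the result dict, appending a member only if it is not
--     already in its representative's list.  No per-line lists, seen-sets or
--     merge branch are needed.
--     """
--     pairs: list[tuple[str, str]] = []
--     for line in cluster_text.splitlines():
--         rep = None
--         for token in line.strip().split():
--             entry_id = token.strip().split("_", 1)[0].upper()
--             if len(entry_id) == 4 and entry_id.isalnum():
--                 if rep is None:
--                     rep = entry_id
--                 pairs.append((rep, entry_id))
--
--     result: dict[str, list[str]] = {}
--     for rep, member in pairs:
--         members = result.setdefault(rep, [])
--         if member not in members: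
--             members.append(member)
--     return result
-- ===== Notes on version B (the rewrite author's own statement) =====
-- stated objective: alternative
-- what changed: A keeps per-line member lists deduped with a seen-set and merges them into the dict with a second seen-set loop; B first flattens the whole text into a stream of (representative, member) pairs and then groups that stream into the dict in one pass, appending a member only when absent from its representative's list -- no per-line lists, no seen-sets, no merge branch.
import Mathlib
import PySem

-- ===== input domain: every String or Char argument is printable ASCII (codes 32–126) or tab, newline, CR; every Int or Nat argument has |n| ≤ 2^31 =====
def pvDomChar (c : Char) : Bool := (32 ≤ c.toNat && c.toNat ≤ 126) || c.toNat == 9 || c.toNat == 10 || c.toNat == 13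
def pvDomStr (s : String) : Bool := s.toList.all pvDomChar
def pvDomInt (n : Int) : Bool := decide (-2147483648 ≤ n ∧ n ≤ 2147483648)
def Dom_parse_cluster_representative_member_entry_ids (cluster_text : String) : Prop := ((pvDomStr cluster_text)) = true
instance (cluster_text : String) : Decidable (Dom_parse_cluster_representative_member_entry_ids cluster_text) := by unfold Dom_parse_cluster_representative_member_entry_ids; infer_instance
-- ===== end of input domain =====

-- B replaces A's per-line dedup sets and merge branch by a flatten-then-group decomposition:
-- phase 1 emits a flat (representative, member) pair stream, phase 2 groups it into the dict,
-- appending a member only when absent from its representative's list (alternative, same cost class).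

-- ===== PORT A =====
def pvIsPdbEntryId (entry_id : String) : Bool :=
  PySem.Str.len entry_id == 4 && PySem.Str.strIsalnum entry_id

def pvClusterEntityToEntryId (entity_id : String) : Option String :=
  let entry_id := PySem.Str.upper (((PySem.Str.splitMax? (PySem.Str.strip entity_id) "_" 1).getD []).headD "")
  if !(pvIsPdbEntryId entry_id) then none else some entry_id

def parse_cluster_representative_member_entry_ids (cluster_text : String) : List (String × List String) :=
  ((PySem.Str.splitlines cluster_text).foldl
    (fun (d : PySem.Dict String (List String)) raw_line =>
      let line := PySem.Str.strip raw_line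
      if PySem.Str.len line == 0 then d else
        let ms := (PySem.Str.split₀ line).foldl
          (fun (st : List String × PySem.Set String) token =>
            match pvClusterEntityToEntryId token with
            | none => st
            | some entry_id =>
              if PySem.Set.contains st.2 entry_id then st
              else (st.1 ++ [entry_id], PySem.Set.add st.2 entry_id))
          ([], PySem.Set.empty)
        match ms.1 with
        | [] => d
        | representative_id :: _ =>
          match d.get? representative_id with
          | none => d.insert representative_id ms.1
          | some existing_members =>
            let merged := ms.1.foldl
              (fun (st : List String × PySem.Set String) member_id =>
                if PySem.Set.contains st.2 member_id then st
                else (st.1 ++ [member_id], PySem.Set.add st.2 member_id))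
              (existing_members, PySem.Set.ofList existing_members)
            d.insert representative_id merged.1)
    PySem.Dict.empty).items

-- ===== PORT B =====
def parse_cluster_representative_member_entry_ids_alt (cluster_text : String) : List (String × List String) :=
  -- phase 1: flatten the text into a stream of (representative, member) pairs
  let pairs := (PySem.Str.splitlines cluster_text).foldl
    (fun (ps : List (String × String)) line =>
      ((PySem.Str.split₀ (PySem.Str.strip line)).foldl
        (fun (st : Option String × List (String × String)) token =>
          let entry_id := PySem.Str.upper (((PySem.Str.splitMax? (PySem.Str.strip token) "_" 1).getD []).headD "")
          if PySem.Str.len entry_id == 4 && PySem.Str.strIsalnum entry_id then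
            match st.1 with
            | none => (some entry_id, st.2 ++ [(entry_id, entry_id)])
            | some rep => (some rep, st.2 ++ [(rep, entry_id)])
          else st)
        (none, ps)).2)
    []
  -- phase 2: group the pair stream, appending a member only when absent from its list
  (pairs.foldl
    (fun (result : PySem.Dict String (List String)) p =>
      let members := result.getD p.1 []
      if p.2 ∈ members then result
      else result.modify p.1 [] (· ++ [p.2]))
    PySem.Dict.empty).items

-- ===== PRECONDITION & SPEC =====
def Spec_parse_cluster_representative_member_entry_ids (cluster_text : String) (out : List (String × List String)) : Prop := out = parse_cluster_representative_member_entry_ids_alt cluster_text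
instance (cluster_text : String) (out : List (String × List String)) : Decidable (Spec_parse_cluster_representative_member_entry_ids cluster_text out) := by unfold Spec_parse_cluster_representative_member_entry_ids; infer_instance

-- ===== CLAIM (what is proved, stated in full; the proofs are below) =====
def Claim_equal_parse_cluster_representative_member_entry_ids : Prop := ∀ (cluster_text : String), Dom_parse_cluster_representative_member_entry_ids cluster_text → Spec_parse_cluster_representative_member_entry_ids cluster_text (parse_cluster_representative_member_entry_ids cluster_text)

-- ===== LEMMAS AND PROOFS =====
set_option maxHeartbeats 1000000

-- named copies of the loop bodies (identical to the ports' lambdas)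
def pvStepA : PySem.Dict String (List String) → String → PySem.Dict String (List String) :=
  fun d raw_line =>
    let line := PySem.Str.strip raw_line
    if PySem.Str.len line == 0 then d else
      let ms := (PySem.Str.split₀ line).foldl
        (fun (st : List String × PySem.Set String) token =>
          match pvClusterEntityToEntryId token with
          | none => st
          | some entry_id =>
            if PySem.Set.contains st.2 entry_id then st
            else (st.1 ++ [entry_id], PySem.Set.add st.2 entry_id))
        ([], PySem.Set.empty)
      match ms.1 with
      | [] => d
      | representative_id :: _ =>
        match d.get? representative_id with
        | none => d.insert representative_id ms.1
        | some existing_members =>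
          let merged := ms.1.foldl
            (fun (st : List String × PySem.Set String) member_id =>
              if PySem.Set.contains st.2 member_id then st
              else (st.1 ++ [member_id], PySem.Set.add st.2 member_id))
            (existing_members, PySem.Set.ofList existing_members)
          d.insert representative_id merged.1

def pvPairStep : (Option String × List (String × String)) → String → (Option String × List (String × String)) :=
  fun st token =>
    let entry_id := PySem.Str.upper (((PySem.Str.splitMax? (PySem.Str.strip token) "_" 1).getD []).headD "")
    if PySem.Str.len entry_id == 4 && PySem.Str.strIsalnum entry_id then
      match st.1 with
      | none => (some entry_id, st.2 ++ [(entry_id, entry_id)])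
      | some rep => (some rep, st.2 ++ [(rep, entry_id)])
    else st

def pvCollectStep : List (String × String) → String → List (String × String) :=
  fun ps line => ((PySem.Str.split₀ (PySem.Str.strip line)).foldl pvPairStep (none, ps)).2

def pvGroupStep : PySem.Dict String (List String) → (String × String) → PySem.Dict String (List String) :=
  fun result p =>
    let members := result.getD p.1 []
    if p.2 ∈ members then result
    else result.modify p.1 [] (· ++ [p.2])

-- the valid entry ids of a line, and its (representative, member) pair stream
def pvIds (line : String) : List String :=
  (PySem.Str.split₀ (PySem.Str.strip line)).filterMap pvClusterEntityToEntryId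

def pvLinePairs (l : List String) : List (String × String) :=
  match l with
  | [] => []
  | r :: _ => l.map (fun m => (r, m))

lemma pv_portA_eq (t : String) :
    parse_cluster_representative_member_entry_ids t
      = ((PySem.Str.splitlines t).foldl pvStepA PySem.Dict.empty).items := by
  unfold parse_cluster_representative_member_entry_ids pvStepA
  rfl

lemma pv_portB_eq (t : String) :
    parse_cluster_representative_member_entry_ids_alt t
      = (((PySem.Str.splitlines t).foldl pvCollectStep []).foldl pvGroupStep PySem.Dict.empty).items := by
  unfold parse_cluster_representative_member_entry_ids_alt pvCollectStep pvPairStep pvGroupStep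
  rfl

-- ===== phase 1: the collected pair list is the flattened per-line pair streams =====

lemma pv_pair_some (tokens : List String) (r : String) (ps : List (String × String)) :
    tokens.foldl pvPairStep (some r, ps)
      = (some r, ps ++ (tokens.filterMap pvClusterEntityToEntryId).map (fun m => (r, m))) := by
  induction tokens generalizing ps with
  | nil => simp
  | cons t ts ih =>
    rw [List.foldl_cons, List.filterMap_cons]
    by_cases h : (PySem.Str.len (PySem.Str.upper (((PySem.Str.splitMax? (PySem.Str.strip t) "_" 1).getD []).headD "")) == 4
        && PySem.Str.strIsalnum (PySem.Str.upper (((PySem.Str.splitMax? (PySem.Str.strip t) "_" 1).getD []).headD ""))) = true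
    · have he : pvClusterEntityToEntryId t
          = some (PySem.Str.upper (((PySem.Str.splitMax? (PySem.Str.strip t) "_" 1).getD []).headD "")) := by
        unfold pvClusterEntityToEntryId pvIsPdbEntryId
        simp only [h, Bool.not_true, Bool.false_eq_true, if_false]
      have hstep : pvPairStep (some r, ps) t
          = (some r, ps ++ [(r, PySem.Str.upper (((PySem.Str.splitMax? (PySem.Str.strip t) "_" 1).getD []).headD ""))]) := by
        unfold pvPairStep
        simp only [h, if_true]
      rw [hstep, he, ih]
      simp
    · have h' := Bool.eq_false_iff.mpr h
      have he : pvClusterEntityToEntryId t = none := by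
        unfold pvClusterEntityToEntryId pvIsPdbEntryId
        simp only [h', Bool.not_false, if_true]
      have hstep : pvPairStep (some r, ps) t = (some r, ps) := by
        unfold pvPairStep
        simp only [h', Bool.false_eq_true, if_false]
      rw [hstep, he, ih]

lemma pv_pair_none (tokens : List String) (ps : List (String × String)) :
    (tokens.foldl pvPairStep (none, ps)).2
      = ps ++ pvLinePairs (tokens.filterMap pvClusterEntityToEntryId) := by
  induction tokens generalizing ps with
  | nil => simp [pvLinePairs]
  | cons t ts ih =>
    rw [List.foldl_cons, List.filterMap_cons]
    by_cases h : (PySem.Str.len (PySem.Str.upper (((PySem.Str.splitMax? (PySem.Str.strip t) "_" 1).getD []).headD "")) == 4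
        && PySem.Str.strIsalnum (PySem.Str.upper (((PySem.Str.splitMax? (PySem.Str.strip t) "_" 1).getD []).headD ""))) = true
    · have he : pvClusterEntityToEntryId t
          = some (PySem.Str.upper (((PySem.Str.splitMax? (PySem.Str.strip t) "_" 1).getD []).headD "")) := by
        unfold pvClusterEntityToEntryId pvIsPdbEntryId
        simp only [h, Bool.not_true, Bool.false_eq_true, if_false]
      have hstep : pvPairStep (none, ps) t
          = (some (PySem.Str.upper (((PySem.Str.splitMax? (PySem.Str.strip t) "_" 1).getD []).headD "")),
             ps ++ [(PySem.Str.upper (((PySem.Str.splitMax? (PySem.Str.strip t) "_" 1).getD []).headD ""),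
                     PySem.Str.upper (((PySem.Str.splitMax? (PySem.Str.strip t) "_" 1).getD []).headD ""))]) := by
        unfold pvPairStep
        simp only [h, if_true]
      rw [hstep, he, pv_pair_some]
      simp [pvLinePairs]
    · have h' := Bool.eq_false_iff.mpr h
      have he : pvClusterEntityToEntryId t = none := by
        unfold pvClusterEntityToEntryId pvIsPdbEntryId
        simp only [h', Bool.not_false, if_true]
      have hstep : pvPairStep (none, ps) t = (none, ps) := by
        unfold pvPairStep
        simp only [h', Bool.false_eq_true, if_false]
      rw [hstep, he, ih]

lemma pv_collect (lines : List String) (ps : List (String × String)) :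
    lines.foldl pvCollectStep ps
      = ps ++ (lines.map (fun l => pvLinePairs (pvIds l))).flatten := by
  induction lines generalizing ps with
  | nil => simp
  | cons l ls ih =>
    rw [List.foldl_cons, List.map_cons, List.flatten_cons]
    show ls.foldl pvCollectStep (pvCollectStep ps l) = _
    rw [show pvCollectStep ps l = ps ++ pvLinePairs (pvIds l) from pv_pair_none _ _, ih,
      List.append_assoc]

-- ===== phase 2: grouping one line's pairs equals A's per-line step =====

lemma pv_insert_noop (d : PySem.Dict String (List String)) (r : String) (v : List String)
    (hnd : d.keys.Nodup) (hv : d.get? r = some v) : d.insert r v = d := by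
  have hc : d.contains r = true := by
    rw [PySem.Dict.contains_eq_isSome_get?, hv]; rfl
  apply PySem.Dict.ext
  rw [PySem.Dict.items_insert_of_contains d v hc]
  have : ∀ p ∈ d.items, (if (p.1 == r) = true then (r, v) else p) = id p := by
    intro p hp
    by_cases h : p.1 = r
    · have hm : (p.1, p.2) ∈ d.items := by simpa using hp
      have := PySem.Dict.get?_of_mem_items d hm hnd
      rw [h, hv] at this
      have hv2 : v = p.2 := by injection this
      simp only [h, beq_self_eq_true, if_true, id]
      rw [hv2, ← h]
    · simp [h]
  rw [List.map_congr_left this, List.map_id]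

lemma pv_group_fold (ms : List String) (d : PySem.Dict String (List String)) (r : String)
    (v : List String) (hnd : d.keys.Nodup) (hv : d.get? r = some v) :
    (ms.map (fun m => (r, m))).foldl pvGroupStep d = d.insert r (PySem.Set.update v ms) := by
  induction ms generalizing d v with
  | nil =>
    simp only [List.map_nil, List.foldl_nil, PySem.Set.update]
    exact (pv_insert_noop d r v hnd hv).symm
  | cons m ms ih =>
    rw [List.map_cons, List.foldl_cons, PySem.Set.update_cons]
    have hg : d.getD r [] = v := PySem.Dict.getD_of_get?_eq_some d [] hv
    by_cases hm : m ∈ v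
    · have hstep : pvGroupStep d (r, m) = d := by
        unfold pvGroupStep
        simp only [hg, hm, if_true]
      rw [hstep, PySem.Set.add_of_mem hm]
      exact ih d v hnd hv
    · have hstep : pvGroupStep d (r, m) = d.insert r (v ++ [m]) := by
        unfold pvGroupStep PySem.Dict.modify
        simp only [hg, hm, if_false]
      rw [hstep, PySem.Set.add_of_not_mem hm,
        ih (d.insert r (v ++ [m])) (v ++ [m]) (PySem.Dict.nodup_keys_insert d r (v ++ [m]) hnd)
          (PySem.Dict.get?_insert_self d r (v ++ [m])),
        PySem.Dict.insert_insert_self]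

lemma pv_split₀_nil (line : String) (h : line.toList = []) : PySem.Str.split₀ line = [] := by
  have hb := PySem.Str.split₀_map_toList line
  rw [h] at hb
  have : PySem.Chars.split₀ [] = [] := rfl
  rw [this] at hb
  exact List.map_eq_nil_iff.mp hb

-- A's inner set-dedup loops (shared by the token loop and the merge loop)
lemma pv_merge_fold (xs : List String) (m : List String) (hm : m.Nodup) :
    xs.foldl
      (fun (st : List String × PySem.Set String) member_id =>
        if PySem.Set.contains st.2 member_id then st
        else (st.1 ++ [member_id], PySem.Set.add st.2 member_id))
      (m, m)
    = (PySem.Set.update m xs, PySem.Set.update m xs) := by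
  induction xs generalizing m with
  | nil => simp [PySem.Set.update]
  | cons x xs ih =>
    rw [List.foldl_cons, PySem.Set.update_cons]
    by_cases hx : x ∈ m
    · have hc : PySem.Set.contains m x = true := (PySem.Set.contains_iff m x).mpr hx
      have ha : PySem.Set.add m x = m := PySem.Set.add_of_mem hx
      simp only [hc, if_true]
      rw [ha]
      exact ih m hm
    · have hc : PySem.Set.contains m x = false := by
        cases h : PySem.Set.contains m x
        · rfl
        · exact absurd ((PySem.Set.contains_iff m x).mp h) hx
      have ha : PySem.Set.add m x = m ++ [x] := PySem.Set.add_of_not_mem hx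
      have hnd : (m ++ [x]).Nodup := ha ▸ PySem.Set.nodup_add m x hm
      simp only [hc, Bool.false_eq_true, if_false]
      rw [ha]
      exact ih (m ++ [x]) hnd

lemma pv_token_fold (tokens : List String) (m : List String) (hm : m.Nodup) :
    tokens.foldl
      (fun (st : List String × PySem.Set String) token =>
        match pvClusterEntityToEntryId token with
        | none => st
        | some entry_id =>
          if PySem.Set.contains st.2 entry_id then st
          else (st.1 ++ [entry_id], PySem.Set.add st.2 entry_id))
      (m, m)
    = (PySem.Set.update m (tokens.filterMap pvClusterEntityToEntryId),
       PySem.Set.update m (tokens.filterMap pvClusterEntityToEntryId)) := by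
  induction tokens generalizing m with
  | nil => simp [PySem.Set.update]
  | cons t ts ih =>
    simp only [List.foldl_cons, List.filterMap_cons]
    cases he : pvClusterEntityToEntryId t with
    | none => exact ih m hm
    | some e =>
      rw [PySem.Set.update_cons]
      by_cases hx : e ∈ m
      · have hc : PySem.Set.contains m e = true := (PySem.Set.contains_iff m e).mpr hx
        have ha : PySem.Set.add m e = m := PySem.Set.add_of_mem hx
        simp only [hc, if_true]
        rw [ha]
        exact ih m hm
      · have hc : PySem.Set.contains m e = false := by
          cases h : PySem.Set.contains m e
          · rfl
          · exact absurd ((PySem.Set.contains_iff m e).mp h) hx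
        have ha : PySem.Set.add m e = m ++ [e] := PySem.Set.add_of_not_mem hx
        have hnd : (m ++ [e]).Nodup := ha ▸ PySem.Set.nodup_add m e hm
        simp only [hc, Bool.false_eq_true, if_false]
        have := ih (m ++ [e]) hnd
        rw [ha]
        simpa using this

lemma pv_update_ofList_right (s : PySem.Set String) (xs : List String) :
    s.update (PySem.Set.ofList xs) = s.update xs := by
  rw [PySem.Set.update_eq_append_filter, PySem.Set.update_eq_append_filter,
    PySem.Set.ofList_ofList]

lemma pv_line (raw : String) (d : PySem.Dict String (List String))
    (hnd : d.keys.Nodup) (hval : ∀ k w, d.get? k = some w → w.Nodup) :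
    (pvLinePairs (pvIds raw)).foldl pvGroupStep d = pvStepA d raw := by
  unfold pvStepA
  by_cases hlen : (PySem.Str.len (PySem.Str.strip raw) == 0) = true
  · have hnil : (PySem.Str.strip raw).toList = [] := by
      have h0 : PySem.Str.len (PySem.Str.strip raw) = 0 := beq_iff_eq.mp hlen
      have h1 : ((PySem.Str.strip raw).toList.length : Int) = 0 := h0
      have : (PySem.Str.strip raw).toList.length = 0 := by exact_mod_cast h1
      exact List.length_eq_zero_iff.mp this
    rw [if_pos hlen]
    unfold pvIds
    rw [pv_split₀_nil _ hnil]
    simp [pvLinePairs]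
  · rw [if_neg hlen]
    -- A's token loop produces the deduped id list
    have htokfold : (PySem.Str.split₀ (PySem.Str.strip raw)).foldl
        (fun (st : List String × PySem.Set String) token =>
          match pvClusterEntityToEntryId token with
          | none => st
          | some entry_id =>
            if PySem.Set.contains st.2 entry_id then st
            else (st.1 ++ [entry_id], PySem.Set.add st.2 entry_id))
        ([], PySem.Set.empty)
        = (PySem.Set.ofList (pvIds raw), PySem.Set.ofList (pvIds raw)) := by
      rw [show (([] : List String), PySem.Set.empty) = (([] : List String), ([] : List String)) from rfl,
        pv_token_fold _ _ List.nodup_nil]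
      unfold pvIds
      rw [PySem.Set.update_nil_left]
    rw [htokfold]
    generalize hids : pvIds raw = ids
    cases ids with
    | nil => simp [pvLinePairs, PySem.Set.ofList]
    | cons r rest =>
      rw [PySem.Set.ofList_cons]
      simp only []
      have hlp : pvLinePairs (r :: rest) = (r :: rest).map (fun m => (r, m)) := rfl
      cases hv : d.get? r with
      | none =>
        -- fresh representative: B appends (r, [r]) then extends it in place
        rw [hlp, List.map_cons, List.foldl_cons]
        have hg : d.getD r [] = [] := PySem.Dict.getD_of_get?_eq_none d [] hv
        have hstep : pvGroupStep d (r, r) = d.insert r [r] := by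
          unfold pvGroupStep PySem.Dict.modify
          simp only [hg, List.not_mem_nil, if_false, List.nil_append]
        rw [hstep,
          pv_group_fold rest (d.insert r [r]) r [r]
            (PySem.Dict.nodup_keys_insert d r [r] hnd) (PySem.Dict.get?_insert_self d r [r]),
          PySem.Dict.insert_insert_self, ← PySem.Set.ofList_cons,
          show PySem.Set.ofList (r :: rest) = PySem.Set.update [] (r :: rest) from
            (PySem.Set.update_nil_left _).symm,
          PySem.Set.update_cons,
          show PySem.Set.add ([] : PySem.Set String) r = [r] from by
            rw [PySem.Set.add_of_not_mem (List.not_mem_nil)]; rfl]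
      | some v =>
        have hvnd : v.Nodup := hval r v hv
        refine Eq.trans ?_ (rfl :
          d.insert r ((r :: (PySem.Set.ofList rest).discard r).foldl
            (fun (st : List String × PySem.Set String) member_id =>
              if PySem.Set.contains st.2 member_id then st
              else (st.1 ++ [member_id], PySem.Set.add st.2 member_id))
            (v, PySem.Set.ofList v)).1 = _)
        rw [hlp, pv_group_fold (r :: rest) d r v hnd hv,
          PySem.Set.ofList_eq_self_of_nodup v hvnd,
          pv_merge_fold (r :: (PySem.Set.ofList rest).discard r) v hvnd,
          ← PySem.Set.ofList_cons, pv_update_ofList_right]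

-- ===== invariants of the grouping fold =====

lemma pv_gstep_inv (d : PySem.Dict String (List String)) (p : String × String)
    (hnd : d.keys.Nodup) (hval : ∀ k w, d.get? k = some w → w.Nodup) :
    (pvGroupStep d p).keys.Nodup ∧ (∀ k w, (pvGroupStep d p).get? k = some w → w.Nodup) := by
  unfold pvGroupStep
  by_cases hm : p.2 ∈ d.getD p.1 []
  · simp only [hm, if_true]
    exact ⟨hnd, hval⟩
  · simp only [hm, if_false, PySem.Dict.modify]
    refine ⟨PySem.Dict.nodup_keys_insert _ _ _ hnd, ?_⟩
    intro k w h
    by_cases hk : k = p.1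
    · rw [hk, PySem.Dict.get?_insert_self] at h
      have hw : w = d.getD p.1 [] ++ [p.2] := by injection h.symm
      subst hw
      cases hg : d.get? p.1 with
      | none => simp [PySem.Dict.getD_of_get?_eq_none d [] hg]
      | some v =>
        rw [PySem.Dict.getD_of_get?_eq_some d [] hg] at hm ⊢
        rw [List.nodup_append]
        refine ⟨hval p.1 v hg, List.nodup_singleton _, fun a ha b hb => ?_⟩
        simp only [List.mem_singleton] at hb
        subst hb
        exact fun h => hm (h ▸ ha)
    · rw [PySem.Dict.get?_insert_of_ne _ _ hk] at h
      exact hval k w h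

lemma pv_gfold_inv (ps : List (String × String)) (d : PySem.Dict String (List String))
    (hnd : d.keys.Nodup) (hval : ∀ k w, d.get? k = some w → w.Nodup) :
    (ps.foldl pvGroupStep d).keys.Nodup ∧
      (∀ k w, (ps.foldl pvGroupStep d).get? k = some w → w.Nodup) := by
  induction ps generalizing d with
  | nil => exact ⟨hnd, hval⟩
  | cons p ps ih =>
    rw [List.foldl_cons]
    obtain ⟨h1, h2⟩ := pv_gstep_inv d p hnd hval
    exact ih _ h1 h2

-- ===== main loop: grouping the flattened pairs equals A's dict loop =====

lemma pv_loop (lines : List String) (d : PySem.Dict String (List String))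
    (hnd : d.keys.Nodup) (hval : ∀ k w, d.get? k = some w → w.Nodup) :
    ((lines.map (fun l => pvLinePairs (pvIds l))).flatten).foldl pvGroupStep d
      = lines.foldl pvStepA d := by
  induction lines generalizing d with
  | nil => rfl
  | cons l ls ih =>
    rw [List.map_cons, List.flatten_cons, List.foldl_append, List.foldl_cons,
      pv_line l d hnd hval]
    have hinv := pv_gfold_inv (pvLinePairs (pvIds l)) d hnd hval
    rw [pv_line l d hnd hval] at hinv
    exact ih _ hinv.1 hinv.2

-- ===== VERDICT (by name: the statement is the Claim_ definition above) =====
theorem parse_cluster_representative_member_entry_ids_spec : Claim_equal_parse_cluster_representative_member_entry_ids := by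
  intro t _
  unfold Spec_parse_cluster_representative_member_entry_ids
  rw [pv_portA_eq, pv_portB_eq, pv_collect, List.nil_append,
    pv_loop _ _ PySem.Dict.nodup_keys_empty
      (by intro k w h; rw [PySem.Dict.get?_empty] at h; cases h)]
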